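-- pv_equiv track=rewrite | github.com/pkgcore/pkgcore | pkgcore/ebuild/filter_env.py | build_regex_string
-- ===== SOURCE A (Python) =====
-- def build_regex_string(tokens):
--     if not tokens:
--         return None
--     result = []
--     for token in tokens:
--         if not token:
--             continue
--         escaped = False
--         l = []
--         for ch in token:
--             if ch == '.' and not escaped:
--                 l.append('[^= ]')
--             else:
--                 l.append(ch)
--             if ch == '\\':
--                 escaped = not escaped
--             else:
--                 escaped = False
--         result.append(''.join(l))
--     if len(result) == 1:
--         return '^%s$' % result[0]
--     return '^(%s)$' % '|'.join(result)
-- ===== SOURCE B (Python) =====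
-- def _sub_dots(token):
--     # Scan by maximal backslash runs: an unescaped '.' (even preceding run)
--     # becomes '[^= ]'; an escaped one (odd run) stays '.'.
--     out = []
--     i = 0
--     n = len(token)
--     while i < n:
--         if token[i] == '\\':
--             j = i
--             while j < n and token[j] == '\\':
--                 j += 1
--             run = j - i
--             out.append('\\' * run)
--             if j < n and token[j] == '.':
--                 out.append('.' if run % 2 else '[^= ]')
--                 j += 1
--             i = j
--         elif token[i] == '.':
--             out.append('[^= ]')
--             i += 1
--         else:
--             out.append(token[i])
--             i += 1
--     return ''.join(out)
--
--
-- def build_regex_string(tokens):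
--     if not tokens:
--         return None
--     result = [_sub_dots(t) for t in tokens if t]
--     if len(result) == 1:
--         return '^%s$' % result[0]
--     return '^(%s)$' % '|'.join(result)
-- ===== Notes on version B (the rewrite author's own statement) =====
-- stated objective: alternative
-- what changed: Replaces the per-character escaped-flag state machine with a scanner that consumes each maximal backslash run at once and decides dot replacement by the run-length parity, and builds the token list by a filtered comprehension instead of an accumulating loop.
import Mathlib
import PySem

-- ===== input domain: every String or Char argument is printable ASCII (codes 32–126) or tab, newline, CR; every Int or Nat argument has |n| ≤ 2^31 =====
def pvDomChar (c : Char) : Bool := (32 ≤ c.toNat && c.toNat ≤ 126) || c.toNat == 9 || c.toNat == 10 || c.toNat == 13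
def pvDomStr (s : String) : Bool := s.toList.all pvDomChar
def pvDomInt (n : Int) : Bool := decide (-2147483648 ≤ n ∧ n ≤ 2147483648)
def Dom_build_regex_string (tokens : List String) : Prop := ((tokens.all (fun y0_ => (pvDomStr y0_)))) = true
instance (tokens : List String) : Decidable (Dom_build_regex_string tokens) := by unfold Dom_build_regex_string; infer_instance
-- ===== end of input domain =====

-- B replaces A's per-character escaped-flag state machine by a maximal-backslash-run scanner
-- deciding dot replacement by run parity (alternative decomposition, same cost).


-- ===== PORT A =====
-- A's inner loop state: (accumulated characters l, escaped flag)
def pvEscStep (p : List Char × Bool) (ch : Char) : List Char × Bool :=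
  (if ch = '.' ∧ p.2 = false then p.1 ++ ['[', '^', '=', ' ', ']'] else p.1 ++ [ch],
   if ch = '\\' then !p.2 else false)

def build_regex_string (tokens : List String) : Option String :=
  if tokens = [] then none
  else
    let result := tokens.foldl (fun result token =>
      if token = "" then result
      else result ++ [String.ofList ((token.toList.foldl pvEscStep ([], false)).1)]) []
    if result.length = 1 then some ("^" ++ result.headD "" ++ "$")
    else some ("^(" ++ PySem.Str.join "|" result ++ ")$")

-- ===== PORT B =====
-- Source B's _sub_dots: the outer while consumes a maximal backslash run in one step
-- (the head backslash plus the further ones taken from the tail), then the optional dot.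
def pvSubDots : List Char → List Char
  | [] => []
  | c :: t =>
    if c = '\\' then
      let k := (t.takeWhile (fun x => x = '\\')).length
      -- Python's 'if j < n and token[j] == "."' on rest = t.drop k: headD with a
      -- non-dot default is false exactly when rest is empty or starts otherwise.
      if (t.drop k).headD ' ' = '.' then
        List.replicate (k + 1) '\\' ++
          (if (k + 1) % 2 = 0 then ['[', '^', '=', ' ', ']'] else ['.']) ++ pvSubDots (t.drop k).tail
      else
        List.replicate (k + 1) '\\' ++ pvSubDots (t.drop k)
    else if c = '.' then ['[', '^', '=', ' ', ']'] ++ pvSubDots t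
    else c :: pvSubDots t
termination_by cs => cs.length
decreasing_by
  all_goals simp


def build_regex_string_alt (tokens : List String) : Option String :=
  if tokens = [] then none
  else
    let result := (tokens.filter (fun t => t ≠ "")).map (fun t => String.ofList (pvSubDots t.toList))
    if result.length = 1 then some ("^" ++ result.headD "" ++ "$")
    else some ("^(" ++ PySem.Str.join "|" result ++ ")$")

-- ===== PRECONDITION & SPEC =====
def Spec_build_regex_string (tokens : List String) (out : Option String) : Prop := out = build_regex_string_alt tokens
instance (tokens : List String) (out : Option String) : Decidable (Spec_build_regex_string tokens out) := by unfold Spec_build_regex_string; infer_instance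

-- ===== CLAIM (what is proved, stated in full; the proofs are below) =====
def Claim_equal_build_regex_string : Prop := ∀ (tokens : List String), Dom_build_regex_string tokens → Spec_build_regex_string tokens (build_regex_string tokens)

-- ===== LEMMAS AND PROOFS =====

-- A recursive characterisation of A's inner fold (emitted chars given the incoming escaped flag).
def pvG : List Char → Bool → List Char
  | [], _ => []
  | c :: t, b =>
    (if c = '.' ∧ b = false then ['[', '^', '=', ' ', ']'] else [c]) ++
      pvG t (if c = '\\' then !b else false)

theorem pvDropTakeWhile (p : Char → Bool) (l : List Char) :
    l.drop (l.takeWhile p).length = l.dropWhile p := by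
  induction l with
  | nil => simp
  | cons a l ih =>
      by_cases h : p a
      · rw [List.takeWhile_cons_of_pos h, List.dropWhile_cons_of_pos h]
        simpa using ih
      · rw [List.takeWhile_cons_of_neg h, List.dropWhile_cons_of_neg h]
        simp

theorem pvDropWhileHead (p : Char → Bool) (l : List Char) (c : Char) (t' : List Char)
    (h : l.dropWhile p = c :: t') : p c = false := by
  induction l with
  | nil => simp at h
  | cons a l ih =>
      by_cases hp : p a
      · rw [List.dropWhile_cons_of_pos hp] at h; exact ih h
      · rw [List.dropWhile_cons_of_neg hp] at h
        cases h; simpa using hp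

theorem pvG_replicate (k : Nat) (rest : List Char) (b : Bool) :
    pvG (List.replicate k '\\' ++ rest) b
      = List.replicate k '\\' ++ pvG rest (xor b (decide (k % 2 = 1))) := by
  induction k generalizing b with
  | zero => simp
  | succ n ih =>
      rw [List.replicate_succ, List.cons_append]
      have e : pvG ('\\' :: (List.replicate n '\\' ++ rest)) b
          = ['\\'] ++ pvG (List.replicate n '\\' ++ rest) (!b) := by
        simp [pvG]
      rw [e, ih]
      have hx : xor (!b) (decide (n % 2 = 1)) = xor b (decide ((n + 1) % 2 = 1)) := by
        rcases Nat.even_or_odd n with h | h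
        · have h0 : n % 2 = 0 := Nat.even_iff.mp h
          have h1 : (n + 1) % 2 = 1 := by omega
          simp [h0, h1]
        · have h0 : n % 2 = 1 := Nat.odd_iff.mp h
          have h1 : (n + 1) % 2 = 0 := by omega
          simp [h0, h1]
      rw [hx]; simp

theorem pvG_eq_pvSubDots (cs : List Char) : pvG cs false = pvSubDots cs := by
  induction hn : cs.length using Nat.strong_induction_on generalizing cs with
  | _ n ih =>
  match cs with
  | [] => simp [pvG, pvSubDots]
  | c :: t =>
    subst hn
    by_cases hc : c = '\\'
    · subst hc
      have hK : t.takeWhile (fun x => x = '\\')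
          = List.replicate (t.takeWhile (fun x => x = '\\')).length '\\' := by
        apply List.eq_replicate_of_mem
        intro x hx
        have := List.mem_takeWhile_imp hx
        simpa using this
      have hteq : List.replicate ((t.takeWhile (fun x => x = '\\')).length + 1) '\\' ++
          t.dropWhile (fun x => x = '\\') = '\\' :: t := by
        rw [List.replicate_succ, List.cons_append]
        congr 1
        conv_rhs => rw [← List.takeWhile_append_dropWhile (p := fun x => x = '\\') (l := t)]
        congr 1
        exact hK.symm
      have hL : pvG ('\\' :: t) false
          = List.replicate ((t.takeWhile (fun x => x = '\\')).length + 1) '\\' ++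
            pvG (t.dropWhile (fun x => x = '\\'))
              (decide (((t.takeWhile (fun x => x = '\\')).length + 1) % 2 = 1)) := by
        rw [← hteq, pvG_replicate]
        simp
      have hdw := pvDropTakeWhile (fun x => decide (x = '\\')) t
      have hdwlen := List.length_dropWhile_le (p := fun x => decide (x = '\\')) (l := t)
      rw [hL]
      conv_rhs => rw [pvSubDots.eq_def]
      simp only [hdw]
      rcases hr : t.dropWhile (fun x => decide (x = '\\')) with _ | ⟨c2, t3⟩
      · simp [pvG, pvSubDots]
      · have hc2 : (decide (c2 = '\\')) = false := pvDropWhileHead _ _ _ _ hr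
        have hc2' : ¬ c2 = '\\' := by simpa using hc2
        rw [hr] at hdwlen
        simp only [List.length_cons] at hdwlen
        by_cases hdot : c2 = '.'
        · subst hdot
          have hg : pvG ('.' :: t3)
                (decide (((t.takeWhile (fun x => x = '\\')).length + 1) % 2 = 1))
              = (if ((t.takeWhile (fun x => x = '\\')).length + 1) % 2 = 0
                   then ['[', '^', '=', ' ', ']'] else ['.']) ++ pvG t3 false := by
            simp only [pvG]
            rcases Nat.eq_zero_or_pos (((t.takeWhile (fun x => x = '\\')).length + 1) % 2)
              with h0 | h1
            · simp [h0]
            · have h1' : ((t.takeWhile (fun x => x = '\\')).length + 1) % 2 = 1 := by omega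
              simp [h1']
          rw [hg, ih t3.length (by simp; omega) t3 rfl]
          simp
        · have h1 : pvG (c2 :: t3)
                (decide (((t.takeWhile (fun x => x = '\\')).length + 1) % 2 = 1))
              = pvG (c2 :: t3) false := by
            simp [pvG, hdot, hc2']
          rw [h1, ih (c2 :: t3).length (by simp; omega) (c2 :: t3) rfl]
          simp [hdot]
    · by_cases hd : c = '.'
      · subst hd
        conv_rhs => rw [pvSubDots.eq_def]
        have hih := ih t.length (by simp) t rfl
        simp [pvG, hc, hih]
      · conv_rhs => rw [pvSubDots.eq_def]
        have hih := ih t.length (by simp) t rfl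
        simp [pvG, hc, hd, hih]

theorem pvFold_eq_pvG (cs : List Char) (acc : List Char) (b : Bool) :
    (cs.foldl pvEscStep (acc, b)).1 = acc ++ pvG cs b := by
  induction cs generalizing acc b with
  | nil => simp [pvG]
  | cons c t ih =>
      simp only [List.foldl_cons, pvG]
      rw [show pvEscStep (acc, b) c =
        (acc ++ (if c = '.' ∧ b = false then ['[', '^', '=', ' ', ']'] else [c]),
         if c = '\\' then !b else false) from by
          simp only [pvEscStep]; split_ifs <;> simp]
      rw [ih]; simp

theorem pvOuterFold (f : String → String) (tokens : List String) (acc : List String) :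
    tokens.foldl (fun res token => if token = "" then res else res ++ [f token]) acc
      = acc ++ (tokens.filter (fun t => t ≠ "")).map f := by
  induction tokens generalizing acc with
  | nil => simp
  | cons t ts ih =>
      by_cases h : t = ""
      · simp [h, ih]
      · simp [h, ih]

-- ===== VERDICT (by name: the statement is the Claim_ definition above) =====
theorem build_regex_string_spec : Claim_equal_build_regex_string := by
  intro tokens _
  unfold Spec_build_regex_string build_regex_string build_regex_string_alt
  rw [pvOuterFold (fun token : String => String.ofList ((token.toList.foldl pvEscStep ([], false)).1))]
  have hfun : (fun token : String => String.ofList ((token.toList.foldl pvEscStep ([], false)).1))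
      = (fun t : String => String.ofList (pvSubDots t.toList)) := by
    funext t
    rw [pvFold_eq_pvG, List.nil_append, pvG_eq_pvSubDots]
  rw [hfun]
  simp
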